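-- pv_equiv track=rewrite | github.com/imn00133/algorithm | KakaoMockExam/Kakao2019Winter/problem3_bad_user.py | solution
-- ===== SOURCE A (Python) =====
-- def compare_str(user, banned):
--     if len(user) != len(banned):
--         return False
--     for index in range(len(user)):
--         if banned[index] == '*':
--             continue
--         elif user[index] != banned[index]:
--             return False
--     return True
--
-- def compare_id(user_id, banned):
--     block_id = []
--     for user in user_id:
--         if compare_str(user, banned):
--             block_id.append(user)
--     return block_id
--
-- def id_count(block_id, ans, whole_ans, index=0):
--     if len(ans) == len(block_id):
--         temp = ans.copy()
--         whole_ans.append(temp)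
--         return 1
--     elif len(block_id) == index:
--         return 0
--     count = 0
--     for block in block_id[index]:
--         if block in ans:
--             continue
--         ans.append(block)
--         count += id_count(block_id, ans, whole_ans, index+1)
--         ans.pop()
--     return count
--
-- def solution(user_id, banned_id):
--     block_id = [[] for _ in range(len(banned_id))]
--     for index in range(len(banned_id)):
--         block_id[index].extend(compare_id(user_id, banned_id[index]))
--
--     # 하나라도 불량 id가 없을 경우 목록은 0이 된다.
--     if not all(block_id):
--         return 0
--
--     ans = []
--     whole_ans = []
--     id_count(block_id, ans, whole_ans)
--     tuple_ans = []
--     for ans in whole_ans: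
--         tuple_ans.append(tuple(sorted(ans)))
--     whole_ans = set(tuple_ans)
--     return len(whole_ans)
-- ===== SOURCE B (Python) =====
-- # Same counting task via itertools.product over per-pattern match lists, instead of recursive backtracking.
-- import itertools
--
-- def solution(user_id, banned_id):
--     def matches(user, banned):
--         return len(user) == len(banned) and all(
--             b == '*' or u == b for u, b in zip(user, banned))
--
--     blocks = [[u for u in user_id if matches(u, b)] for b in banned_id]
--     result = set()
--     for combo in itertools.product(*blocks):
--         if len(set(combo)) == len(combo):
--             result.add(tuple(sorted(combo)))
--     return len(result)
-- ===== Notes on version B (the rewrite author's own statement) =====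
-- stated objective: simpler
-- what changed: Replaces the recursive backtracking (id_count mutating ans/whole_ans, then deduplicating via sorted tuples) with a direct itertools.product over the per-pattern match lists, filtered for all-distinct tuples and collected as a set of sorted tuples.
import Mathlib
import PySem

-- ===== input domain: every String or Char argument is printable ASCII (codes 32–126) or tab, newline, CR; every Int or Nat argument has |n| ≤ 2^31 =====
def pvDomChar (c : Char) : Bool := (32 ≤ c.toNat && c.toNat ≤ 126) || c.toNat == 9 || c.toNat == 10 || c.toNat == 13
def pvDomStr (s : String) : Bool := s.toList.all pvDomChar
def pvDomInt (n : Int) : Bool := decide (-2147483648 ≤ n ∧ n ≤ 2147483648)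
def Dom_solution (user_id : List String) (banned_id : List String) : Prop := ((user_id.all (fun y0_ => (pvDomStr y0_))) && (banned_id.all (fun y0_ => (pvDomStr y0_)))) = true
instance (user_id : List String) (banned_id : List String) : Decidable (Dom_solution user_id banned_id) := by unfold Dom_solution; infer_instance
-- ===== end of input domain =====

-- B replaces A's recursive backtracking (id_count with mutation and a whole_ans side list)
-- by a cartesian product of the per-pattern match lists filtered for all-distinct tuples; objective: simpler.

-- ===== PORT A =====
-- the index loop of compare_str (continue on '*', early return False on mismatch)
def compareLoop : List Char → List Char → Bool
  | [], _ => true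
  | _ :: _, [] => true
  | uc :: us, bc :: bs =>
      if bc = '*' then compareLoop us bs
      else if uc ≠ bc then false
      else compareLoop us bs

def compareStr (user banned : String) : Bool :=
  if user.toList.length ≠ banned.toList.length then false
  else compareLoop user.toList banned.toList

def compareId (user_id : List String) (banned : String) : List String :=
  user_id.foldl (fun acc u => if compareStr u banned then acc ++ [u] else acc) []

-- id_count, transliterated with the still-unprocessed suffix of block_id in place of the
-- index (blockLen = len(block_id)); returns (count, whole_ans); idLoop is the inner for-loop.
mutual
def idCount (blockLen : Nat) (rest : List (List String)) (ans : List String)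
    (whole : List (List String)) : Int × List (List String) :=
  if ans.length = blockLen then (1, whole ++ [ans])
  else
    match rest with
    | [] => (0, whole)
    | blk :: rest' => idLoop blockLen rest' ans whole blk
  termination_by (rest.length, 1, 0)

def idLoop (blockLen : Nat) (rest' : List (List String)) (ans : List String)
    (whole : List (List String)) (l : List String) : Int × List (List String) :=
  match l with
  | [] => (0, whole)
  | b :: bs =>
      if b ∈ ans then idLoop blockLen rest' ans whole bs
      else
        let r := idCount blockLen rest' (ans ++ [b]) whole
        let r2 := idLoop blockLen rest' ans r.2 bs
        (r.1 + r2.1, r2.2)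
  termination_by (rest'.length + 1, 0, l.length)
end

def solution (user_id : List String) (banned_id : List String) : Int :=
  let block_id := banned_id.map (fun b => compareId user_id b)
  if ¬ (block_id.all (fun l => !l.isEmpty)) then 0
  else
    let whole := (idCount block_id.length block_id [] []).2
    let tuple_ans := whole.map (fun l => PySem.List.sorted l (fun x => x) false)
    PySem.Set.len (PySem.Set.ofList tuple_ans)

-- ===== PORT B =====
def matchStr (user banned : String) : Bool :=
  user.toList.length == banned.toList.length &&
    (user.toList.zip banned.toList).all (fun p => p.2 == '*' || p.1 == p.2)

-- itertools.product(*ls) (leftmost factor varies slowest)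
def pyProduct (ls : List (List String)) : List (List String) :=
  ls.foldr (fun l acc => l.flatMap (fun x => acc.map (x :: ·))) [[]]

def solution_alt (user_id : List String) (banned_id : List String) : Int :=
  let blocks := banned_id.map (fun b => user_id.filter (fun u => matchStr u b))
  let result := (pyProduct blocks).foldl
    (fun s combo =>
      if PySem.Set.len (PySem.Set.ofList combo) = PySem.List.len combo then
        PySem.Set.add s (PySem.List.sorted combo (fun x => x) false)
      else s)
    (PySem.Set.empty : PySem.Set (List String))
  PySem.Set.len result

-- ===== PRECONDITION & SPEC =====
def Spec_solution (user_id : List String) (banned_id : List String) (out : Int) : Prop := out = solution_alt user_id banned_id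
instance (user_id : List String) (banned_id : List String) (out : Int) : Decidable (Spec_solution user_id banned_id out) := by unfold Spec_solution; infer_instance

-- ===== CLAIM (what is proved, stated in full; the proofs are below) =====
def Claim_equal_solution : Prop := ∀ (user_id : List String) (banned_id : List String), Dom_solution user_id banned_id → Spec_solution user_id banned_id (solution user_id banned_id)

-- ===== LEMMAS AND PROOFS =====

theorem compareLoop_eq_zip_all (u : List Char) : ∀ b : List Char,
    compareLoop u b = (u.zip b).all (fun p => p.2 == '*' || p.1 == p.2) := by
  induction u with
  | nil => intro b; simp [compareLoop]
  | cons uc us ih =>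
      intro b
      cases b with
      | nil => simp [compareLoop]
      | cons bc bs =>
          simp only [compareLoop, List.zip_cons_cons, List.all_cons, ih]
          by_cases h1 : bc = '*'
          · simp [h1]
          · by_cases h2 : uc = bc <;> simp [h1, h2]

theorem compareStr_eq_matchStr (u b : String) : compareStr u b = matchStr u b := by
  unfold compareStr matchStr
  by_cases h : u.toList.length = b.toList.length
  · have h' : u.length = b.length := by simpa using h
    simp [h, compareLoop_eq_zip_all]
  · have h' : u.length ≠ b.length := by simpa using h
    simp [h']

theorem compareId_eq_filter (user_id : List String) (b : String) :
    compareId user_id b = user_id.filter (fun u => matchStr u b) := by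
  unfold compareId
  rw [show (fun (acc : List String) u => if compareStr u b then acc ++ [u] else acc)
        = (fun acc u => if (fun x => compareStr x b) u then acc ++ [id u] else acc) by rfl,
      PySem.List.foldl_append_if]
  simp only [List.nil_append, List.map_id]
  exact List.filter_congr (fun u _ => compareStr_eq_matchStr u b)

-- proof-side characterisation of the lists collected in whole_ans
def sels (rest : List (List String)) (ans : List String) : List (List String) :=
  match rest with
  | [] => [[]]
  | blk :: rest' =>
      blk.flatMap (fun b => if b ∈ ans then [] else (sels rest' (ans ++ [b])).map (b :: ·))

-- the successive-distinctness test the backtracking performs, as a predicate on the tuple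
def distinctFrom (ans : List String) : List String → Bool
  | [] => true
  | b :: p => !(decide (b ∈ ans)) && distinctFrom (ans ++ [b]) p

theorem idCount_snd (blockLen : Nat) (rest : List (List String)) :
    ∀ (ans : List String) (whole : List (List String)),
      rest.length + ans.length = blockLen →
      (idCount blockLen rest ans whole).2 = whole ++ (sels rest ans).map (fun p => ans ++ p) := by
  induction rest with
  | nil =>
      intro ans whole h
      simp only [List.length_nil, Nat.zero_add] at h
      simp [idCount, h, sels]
  | cons blk rest' ih =>
      intro ans whole h
      have hne : ans.length ≠ blockLen := by simp at h; omega
      have hloop : ∀ (l : List String) (whole : List (List String)),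
          (idLoop blockLen rest' ans whole l).2 =
            whole ++ (l.flatMap (fun b => if b ∈ ans then [] else
              (sels rest' (ans ++ [b])).map (b :: ·))).map (fun p => ans ++ p) := by
        intro l
        induction l with
        | nil => intro whole; simp [idLoop]
        | cons b bs ihl =>
            intro whole
            by_cases hb : b ∈ ans
            · simp [idLoop, hb, ihl]
            · have hlen : rest'.length + (ans ++ [b]).length = blockLen := by
                simp at h ⊢; omega
              simp only [idLoop, hb, List.flatMap_cons, ihl,
                ih (ans ++ [b]) whole hlen, List.map_append, List.append_assoc]
              simp [Function.comp_def, - List.append_cons]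
      simp only [idCount, if_neg hne, hloop]
      simp [sels]

theorem sels_eq_filter (rest : List (List String)) :
    ∀ ans, sels rest ans = (pyProduct rest).filter (distinctFrom ans) := by
  induction rest with
  | nil => intro ans; simp [sels, pyProduct, distinctFrom]
  | cons blk rest' ih =>
      intro ans
      have hprod : pyProduct (blk :: rest')
          = blk.flatMap (fun x => (pyProduct rest').map (x :: ·)) := rfl
      rw [sels, hprod, List.filter_flatMap]
      refine List.flatMap_congr (fun b _ => ?_)
      rw [List.filter_map]
      by_cases hb : b ∈ ans
      · rw [if_pos hb]
        have hf : ∀ p ∈ pyProduct rest', ¬ ((distinctFrom ans ∘ (b :: ·)) p = true) :=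
          fun p _ => by simp [Function.comp, distinctFrom, hb]
        rw [List.filter_eq_nil_iff.mpr hf, List.map_nil]
      · rw [if_neg hb, ih]
        congr 1
        exact List.filter_congr fun p _ => by simp [Function.comp, distinctFrom, hb]

theorem distinctFrom_iff (p : List String) : ∀ ans,
    distinctFrom ans p = true ↔ p.Nodup ∧ ∀ x ∈ p, x ∉ ans := by
  induction p with
  | nil => intro ans; simp [distinctFrom]
  | cons b p' ih =>
      intro ans
      simp only [distinctFrom, Bool.and_eq_true, Bool.not_eq_true', decide_eq_false_iff_not,
        ih, List.nodup_cons]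
      constructor
      · rintro ⟨hb, hnd, hall⟩
        refine ⟨⟨fun hmem => hall b hmem (by simp), hnd⟩, ?_⟩
        intro x hx
        rcases List.mem_cons.mp hx with rfl | hx'
        · exact hb
        · exact fun hxa => hall x hx' (by simp [hxa])
      · rintro ⟨⟨hbp, hnd⟩, hall⟩
        refine ⟨hall b List.mem_cons_self, hnd, fun x hx hmem => ?_⟩
        rcases List.mem_append.mp hmem with hxa | hxb
        · exact hall x (List.mem_cons_of_mem _ hx) hxa
        · exact hbp (by rwa [List.mem_singleton.mp hxb] at hx)

theorem ofList_len_eq_iff_nodup (p : List String) :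
    (PySem.Set.ofList p).length = p.length ↔ p.Nodup := by
  have hperm : (PySem.Set.ofList p).Perm p.dedup := by
    rw [List.perm_ext_iff_of_nodup (PySem.Set.nodup_ofList p) p.nodup_dedup]
    intro a; rw [PySem.Set.mem_ofList, List.mem_dedup]
  rw [hperm.length_eq]
  constructor
  · intro h
    rw [← List.dedup_eq_self]
    exact p.dedup_sublist.eq_of_length h
  · intro h; rw [List.dedup_eq_self.mpr h]

theorem pyProduct_of_mem_nil (ls : List (List String)) (h : [] ∈ ls) : pyProduct ls = [] := by
  induction ls with
  | nil => simp at h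
  | cons l ls' ih =>
      rcases List.mem_cons.mp h with h | h
      · simp [pyProduct, ← h]
      · simp [pyProduct]
        intro x _
        have : pyProduct ls' = [] := ih h
        simp [pyProduct] at this
        simp [this]

theorem foldl_add_if_eq_ofList (Q : List String → Prop) [DecidablePred Q] (l : List (List String)) :
    ∀ (s : PySem.Set (List String)),
      l.foldl (fun s c => if Q c then PySem.Set.add s (PySem.List.sorted c (fun x => x) false) else s) s
        = ((l.filter (fun c => decide (Q c))).map (fun c => PySem.List.sorted c (fun x => x) false)).foldl PySem.Set.add s := by
  induction l with
  | nil => intro s; simp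
  | cons c l' ih =>
      intro s
      by_cases h : Q c <;> simp [h, ih]

-- ===== VERDICT (by name: the statement is the Claim_ definition above) =====
theorem solution_spec : Claim_equal_solution := by
  intro user_id banned_id _
  unfold Spec_solution solution solution_alt
  have hblocks : banned_id.map (fun b => compareId user_id b)
      = banned_id.map (fun b => user_id.filter (fun u => matchStr u b)) := by
    exact List.map_congr_left (fun b _ => compareId_eq_filter user_id b)
  rw [hblocks]
  set blocks := banned_id.map (fun b => user_id.filter (fun u => matchStr u b)) with hb
  by_cases hall : blocks.all (fun l => !l.isEmpty)
  · rw [if_neg (fun hcon => hcon hall)]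
    have hwhole := idCount_snd blocks.length blocks [] [] (by simp)
    rw [hwhole]
    simp only [List.nil_append, List.map_id']
    rw [sels_eq_filter blocks [],
      foldl_add_if_eq_ofList (fun combo => PySem.Set.len (PySem.Set.ofList combo) = PySem.List.len combo)]
    have hfc : (pyProduct blocks).filter (distinctFrom []) =
        (pyProduct blocks).filter
          (fun c => decide (PySem.Set.len (PySem.Set.ofList c) = PySem.List.len c)) := by
      refine List.filter_congr (fun c _ => ?_)
      have h1 : distinctFrom [] c = true ↔ c.Nodup := by
        rw [distinctFrom_iff]; simp
      have h2 : (PySem.Set.len (PySem.Set.ofList c) = PySem.List.len c) ↔ c.Nodup := by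
        unfold PySem.Set.len
        rw [PySem.List.len_eq, Nat.cast_inj]
        exact ofList_len_eq_iff_nodup c
      rw [Bool.eq_iff_iff]
      simp [h1, ofList_len_eq_iff_nodup]
    rw [hfc]
    rfl
  · rw [if_pos hall]
    have hnil : [] ∈ blocks := by
      simp only [List.all_eq_true] at hall
      push_neg at hall
      rcases hall with ⟨l, hl, hle⟩
      have hl0 : l = [] := by
        cases l with
        | nil => rfl
        | cons a as => simp at hle
      exact hl0 ▸ hl
    simp [pyProduct_of_mem_nil blocks hnil, PySem.Set.len, PySem.Set.empty]
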